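-- pv_equiv track=rewrite | github.com/ShadFyt/rallyCoding | python/288.py | solve
-- ===== SOURCE A (Python) =====
-- from typing import List
--
-- def solve(directions: List):
--     cord = [0, 0]
--     for m in directions:
--         if m == "up":
--             cord[1] += 1
--         elif m == "down":
--             cord[1] -= 1
--         elif m == "right":
--             cord[0] += 1
--         else:
--             cord[0] -= 1
--     return cord
-- ===== SOURCE B (Python) =====
-- from typing import List
-- from collections import Counter
--
-- def solve(directions: List):
--     c = Counter(directions)
--     up, down, right = c["up"], c["down"], c["right"]
--     y = up - down
--     x = right - (len(directions) - up - down - right)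
--     return [x, y]
-- ===== Notes on version B (the rewrite author's own statement) =====
-- stated objective: idiomatic
-- what changed: Replaces the per-element branching loop with a Counter tally and closed-form arithmetic: y = up-down, x = right minus all other tokens (matching A's catch-all else).
import Mathlib
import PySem

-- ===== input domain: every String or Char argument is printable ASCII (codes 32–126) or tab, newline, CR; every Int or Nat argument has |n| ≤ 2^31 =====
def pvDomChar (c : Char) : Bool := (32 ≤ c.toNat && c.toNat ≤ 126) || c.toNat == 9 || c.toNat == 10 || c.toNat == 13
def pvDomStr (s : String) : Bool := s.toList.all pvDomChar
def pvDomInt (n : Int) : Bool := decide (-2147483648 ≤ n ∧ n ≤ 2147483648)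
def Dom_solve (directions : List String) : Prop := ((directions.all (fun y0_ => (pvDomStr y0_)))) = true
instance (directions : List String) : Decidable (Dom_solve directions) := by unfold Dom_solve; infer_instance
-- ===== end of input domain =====

-- ===== PORT A =====
-- Header: B tallies direction counts once and computes [x, y] by closed-form arithmetic (idiomatic rewrite of A's branching loop).
def solve (directions : List String) : List Int :=
  let cord := directions.foldl (fun cord m =>
      if m = "up" then (cord.1, cord.2 + 1)
      else if m = "down" then (cord.1, cord.2 - 1)
      else if m = "right" then (cord.1 + 1, cord.2)
      else (cord.1 - 1, cord.2)) ((0 : Int), (0 : Int))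
  [cord.1, cord.2]

-- ===== PORT B =====
def solve_alt (directions : List String) : List Int :=
  let up : Int := directions.count "up"
  let down : Int := directions.count "down"
  let right : Int := directions.count "right"
  let y := up - down
  let x := right - ((directions.length : Int) - up - down - right)
  [x, y]

-- ===== PRECONDITION & SPEC =====
def Spec_solve (directions : List String) (out : List Int) : Prop := out = solve_alt directions
instance (directions : List String) (out : List Int) : Decidable (Spec_solve directions out) := by unfold Spec_solve; infer_instance

-- ===== CLAIM (what is proved, stated in full; the proofs are below) =====
def Claim_equal_solve : Prop := ∀ (directions : List String), Dom_solve directions → Spec_solve directions (solve directions)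

-- ===== LEMMAS AND PROOFS =====

-- ===== VERDICT (by name: the statement is the Claim_ definition above) =====
lemma solve_fold (directions : List String) (a : Int × Int) :
    directions.foldl (fun cord m =>
      if m = "up" then (cord.1, cord.2 + 1)
      else if m = "down" then (cord.1, cord.2 - 1)
      else if m = "right" then (cord.1 + 1, cord.2)
      else (cord.1 - 1, cord.2)) a
    = (a.1 + (directions.count "right" : Int)
        - ((directions.length : Int) - directions.count "up" - directions.count "down" - directions.count "right"),
       a.2 + (directions.count "up" : Int) - directions.count "down") := by
  induction directions generalizing a with
  | nil => simp
  | cons h t ih =>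
    by_cases h1 : h = "up"
    · subst h1
      simp [List.foldl_cons, ih, List.count_cons, Prod.ext_iff]
      push_cast; omega
    · by_cases h2 : h = "down"
      · subst h2
        simp [List.foldl_cons, ih, List.count_cons, Prod.ext_iff]
        push_cast; omega
      · by_cases h3 : h = "right"
        · subst h3
          simp [List.foldl_cons, ih, List.count_cons, Prod.ext_iff]
          push_cast; omega
        · simp [List.foldl_cons, ih, List.count_cons, Prod.ext_iff, h1, h2, h3]
          push_cast; omega

theorem solve_spec : Claim_equal_solve := by
  intro directions _
  unfold Spec_solve solve solve_alt
  simp only [solve_fold]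
  norm_num
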